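-- pv_equiv track=rewrite | github.com/JanCBrammer/advent_of_code | day15/solution.py | compose_teaspoons
-- ===== SOURCE A (Python) =====
-- def compose_teaspoons(n_ingredients: int, n_tablespoons: int, parent=tuple()):
--     if n_ingredients > 1:
--         for n in range(n_tablespoons + 1):
--             for composition in compose_teaspoons(
--                 n_ingredients - 1, n, parent + (n_tablespoons - n,)
--             ):
--                 yield composition
--     else:
--         yield parent + (n_tablespoons,)
-- ===== SOURCE B (Python) =====
-- def compose_teaspoons(n_ingredients: int, n_tablespoons: int, parent=tuple()):
--     # Iterative breadth-first expansion of (prefix, remaining) states instead of recursion.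
--     level = [(tuple(parent), n_tablespoons)]
--     for _ in range(n_ingredients - 1):
--         if not level:
--             break
--         level = [(p + (r - n,), n) for (p, r) in level for n in range(r + 1)]
--     for p, r in level:
--         yield p + (r,)
-- ===== Notes on version B (the rewrite author's own statement) =====
-- stated objective: alternative
-- what changed: Replaced A's per-ingredient recursive generator with an iterative breadth-first expansion of a worklist of (prefix, remaining) states, one level per ingredient, yielding the same compositions in the same order; Pre_ excludes only the inputs (n_ingredients >= 999 with n_tablespoons >= 0) on which A raises RecursionError.
import Mathlib
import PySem

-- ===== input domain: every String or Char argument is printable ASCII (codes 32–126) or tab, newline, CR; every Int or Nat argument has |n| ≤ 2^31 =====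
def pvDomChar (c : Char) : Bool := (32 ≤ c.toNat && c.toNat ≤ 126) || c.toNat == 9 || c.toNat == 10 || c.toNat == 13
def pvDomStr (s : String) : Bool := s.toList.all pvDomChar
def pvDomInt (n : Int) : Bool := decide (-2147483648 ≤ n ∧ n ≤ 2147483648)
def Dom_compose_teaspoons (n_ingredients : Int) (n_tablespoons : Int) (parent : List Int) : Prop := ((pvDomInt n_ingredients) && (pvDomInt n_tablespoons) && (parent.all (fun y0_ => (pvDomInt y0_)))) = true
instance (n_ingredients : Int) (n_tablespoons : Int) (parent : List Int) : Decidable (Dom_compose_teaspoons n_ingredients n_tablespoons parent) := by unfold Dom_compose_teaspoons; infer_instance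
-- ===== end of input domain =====

-- B replaces A's per-ingredient recursion by an iterative breadth-first expansion of
-- (prefix, remaining) states; objective: alternative (same outputs in the same order).

-- ===== PORT A =====
-- literal port of A's recursive generator (the yielded tuples, in order)
def compose_teaspoons (n_ingredients : Int) (n_tablespoons : Int) (parent : List Int) : List (List Int) :=
  if _h : n_ingredients > 1 then
    (PySem.List.pyRange 0 (n_tablespoons + 1) 1).flatMap
      (fun n => compose_teaspoons (n_ingredients - 1) n (parent ++ [n_tablespoons - n]))
  else
    [parent ++ [n_tablespoons]]
termination_by n_ingredients.toNat
decreasing_by omega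

-- ===== PORT B =====
-- one expansion step: the inner comprehension of Source B
def pvStepB (level : List (List Int × Int)) : List (List Int × Int) :=
  level.flatMap (fun pr =>
    (PySem.List.pyRange 0 (pr.2 + 1) 1).map (fun n => (pr.1 ++ [pr.2 - n], n)))

-- the 'for _ in range(n_ingredients - 1)' loop with its 'if not level: break'
def pvLoopB : Nat → List (List Int × Int) → List (List Int × Int)
  | 0, level => level
  | m + 1, level => if level = [] then level else pvLoopB m (pvStepB level)

def compose_teaspoons_alt (n_ingredients : Int) (n_tablespoons : Int) (parent : List Int) : List (List Int) :=
  (pvLoopB (n_ingredients - 1).toNat [(parent, n_tablespoons)]).map (fun pr => pr.1 ++ [pr.2])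

-- ===== PRECONDITION & SPEC =====
-- Pre_ excludes exactly the inputs on which Python A raises RecursionError: n_ingredients >= 999
-- with n_tablespoons >= 0 makes A recurse n_ingredients frames deep, past CPython's default limit.
def Pre_compose_teaspoons (n_ingredients : Int) (n_tablespoons : Int) (parent : List Int) : Prop :=
  n_ingredients < 999 ∨ n_tablespoons < 0
instance (n_ingredients : Int) (n_tablespoons : Int) (parent : List Int) : Decidable (Pre_compose_teaspoons n_ingredients n_tablespoons parent) := by unfold Pre_compose_teaspoons; infer_instance
def pvWitness_compose_teaspoons : Int × Int × List Int := (3, 4, [7])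

def Spec_compose_teaspoons (n_ingredients : Int) (n_tablespoons : Int) (parent : List Int) (out : List (List Int)) : Prop := out = compose_teaspoons_alt n_ingredients n_tablespoons parent
instance (n_ingredients : Int) (n_tablespoons : Int) (parent : List Int) (out : List (List Int)) : Decidable (Spec_compose_teaspoons n_ingredients n_tablespoons parent out) := by unfold Spec_compose_teaspoons; infer_instance

-- ===== CLAIM (what is proved, stated in full; the proofs are below) =====
def Claim_equal_compose_teaspoons : Prop := ∀ (n_ingredients : Int) (n_tablespoons : Int) (parent : List Int), Dom_compose_teaspoons n_ingredients n_tablespoons parent → Pre_compose_teaspoons n_ingredients n_tablespoons parent → Spec_compose_teaspoons n_ingredients n_tablespoons parent (compose_teaspoons n_ingredients n_tablespoons parent)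

-- ===== LEMMAS AND PROOFS =====

-- reference recursion on a Nat fuel (the number of remaining expansion steps)
def pvG : Nat → Int → List Int → List (List Int)
  | 0, t, p => [p ++ [t]]
  | m + 1, t, p =>
      (PySem.List.pyRange 0 (t + 1) 1).flatMap (fun n => pvG m n (p ++ [t - n]))

theorem pvA_eq_G (k t : Int) (p : List Int) :
    compose_teaspoons k t p = pvG (k - 1).toNat t p := by
  by_cases h : k > 1
  · have hk : (k - 1).toNat = (k - 2).toNat + 1 := by omega
    rw [compose_teaspoons, dif_pos h, hk, pvG]
    refine congrFun (congrArg List.flatMap ?_) _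
    funext n
    have : (k - 1 - 1).toNat = (k - 2).toNat := by omega
    rw [pvA_eq_G (k - 1) n (p ++ [t - n]), this]
  · have hk : (k - 1).toNat = 0 := by omega
    rw [compose_teaspoons, dif_neg h, hk, pvG]
termination_by k.toNat
decreasing_by omega

theorem pvB_loop_eq_G (m : Nat) (level : List (List Int × Int)) :
    (pvLoopB m level).map (fun pr => pr.1 ++ [pr.2]) =
      level.flatMap (fun pr => pvG m pr.2 pr.1) := by
  induction m generalizing level with
  | zero =>
      rw [pvLoopB]
      have hG : (fun pr : List Int × Int => pvG 0 pr.2 pr.1) = fun pr => [pr.1 ++ [pr.2]] := by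
        funext pr; rw [pvG]
      rw [hG, ← List.flatMap_map (fun pr : List Int × Int => pr.1 ++ [pr.2]) (fun x => [x]) level,
        List.flatMap_singleton']
  | succ m ih =>
      rw [pvLoopB]
      by_cases h : level = []
      · simp [h]
      · rw [if_neg h, ih, pvStepB, List.flatMap_assoc]
        refine congrFun (congrArg List.flatMap ?_) _
        funext pr
        rw [List.flatMap_map, pvG]

theorem compose_teaspoons_spec : Claim_equal_compose_teaspoons := by
  intro k t p _ _
  unfold Spec_compose_teaspoons compose_teaspoons_alt
  rw [pvB_loop_eq_G, pvA_eq_G]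
  simp [List.flatMap]
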